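-- pv_equiv track=rewrite | github.com/PCcoding666/bailian_gateway | backend/utils/security_middleware.py | check_xss_attempt
-- ===== SOURCE A (Python) =====
-- def check_xss_attempt(content: str) -> bool:
--     """Check for XSS patterns"""
--     if not content:
--         return False
--
--     xss_patterns = [
--         "<script",
--         "javascript:",
--         "vbscript:",
--         "onload=",
--         "onerror=",
--         "onclick=",
--         "onmouseover="
--     ]
--
--     content_lower = content.lower()
--     return any(pattern in content_lower for pattern in xss_patterns)
-- ===== SOURCE B (Python) =====
-- _XSS_PATTERNS = (
--     "<script",
--     "javascript:",
--     "vbscript:",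
--     "onload=",
--     "onerror=",
--     "onclick=",
--     "onmouseover=",
-- )
--
--
-- def check_xss_attempt(content: str) -> bool:
--     """Check for XSS patterns by a single left-to-right positional scan."""
--     lowered = content.lower()
--     return any(
--         lowered.startswith(p, i)
--         for i in range(len(lowered))
--         for p in _XSS_PATTERNS
--     )
-- ===== Notes on version B (the rewrite author's own statement) =====
-- stated objective: alternative
-- what changed: Replaces seven independent full substring scans ('pattern in content_lower' per pattern) by one left-to-right positional scan that tests at each index whether any pattern starts there (str.startswith with a position argument), with no early-return on empty input.
import Mathlib
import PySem

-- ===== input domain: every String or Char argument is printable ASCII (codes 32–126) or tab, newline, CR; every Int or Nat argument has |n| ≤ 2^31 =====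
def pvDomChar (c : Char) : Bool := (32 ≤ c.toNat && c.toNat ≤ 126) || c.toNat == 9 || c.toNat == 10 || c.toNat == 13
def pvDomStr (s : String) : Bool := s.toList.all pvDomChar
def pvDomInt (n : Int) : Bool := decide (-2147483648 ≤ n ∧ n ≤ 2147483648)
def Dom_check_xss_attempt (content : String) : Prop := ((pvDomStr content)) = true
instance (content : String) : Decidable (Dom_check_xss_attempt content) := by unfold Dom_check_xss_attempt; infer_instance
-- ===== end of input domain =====

-- B replaces seven independent full substring scans by one left-to-right positional scan
-- that tests at each index whether any pattern starts there (objective: alternative).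


-- ===== PORT A =====
-- the pattern list shared by both Pythons (A's xss_patterns literal / B's _XSS_PATTERNS)
def xssPatterns : List String :=
  ["<script", "javascript:", "vbscript:", "onload=", "onerror=", "onclick=", "onmouseover="]

def check_xss_attempt (content : String) : Bool :=
  if PySem.Str.len content == 0 then false
  else
    let content_lower := PySem.Str.lower content
    xssPatterns.any (fun pattern => PySem.Str.isIn pattern content_lower)

-- ===== PORT B =====
def check_xss_attempt_alt (content : String) : Bool :=
  let lowered := PySem.Chars.lower content.toList
  (List.range lowered.length).any (fun i =>
    xssPatterns.any (fun p => PySem.Chars.startswith (lowered.drop i) p.toList))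

-- ===== PRECONDITION & SPEC =====
def Spec_check_xss_attempt (content : String) (out : Bool) : Prop := out = check_xss_attempt_alt content
instance (content : String) (out : Bool) : Decidable (Spec_check_xss_attempt content out) := by unfold Spec_check_xss_attempt; infer_instance

-- ===== CLAIM (what is proved, stated in full; the proofs are below) =====
def Claim_equal_check_xss_attempt : Prop := ∀ (content : String), Dom_check_xss_attempt content → Spec_check_xss_attempt content (check_xss_attempt content)

-- ===== LEMMAS AND PROOFS =====

-- a nonempty pattern occurs somewhere in L iff it starts at some position i < L.length
lemma isIn_eq_any_startswith (L p : List Char) (hp : p ≠ []) :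
    PySem.Chars.isIn p L = (List.range L.length).any (fun i => PySem.Chars.startswith (L.drop i) p) := by
  rcases h : PySem.Chars.isIn p L with _ | _
  · rw [PySem.Chars.isIn_eq_false_iff] at h
    symm
    simp only [List.any_eq_false, List.mem_range]
    intro i _ hsw
    exact h (List.infix_iff_prefix_suffix.mpr
      ⟨L.drop i, (PySem.Chars.startswith_iff _ _).mp hsw, List.drop_suffix i L⟩)
  · symm
    obtain ⟨j, hj⟩ := (PySem.Chars.exists_prefix_drop_iff_isIn (s := L) (sub := p)).mpr h
    have hjlt : j < L.length := by
      by_contra hge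
      have hnil : L.drop j = [] := List.drop_eq_nil_of_le (by omega)
      rw [hnil, List.prefix_nil] at hj
      exact hp hj
    simp only [List.any_eq_true, List.mem_range]
    exact ⟨j, hjlt, (PySem.Chars.startswith_iff _ _).mpr hj⟩

lemma check_xss_eq (content : String) :
    check_xss_attempt content = check_xss_attempt_alt content := by
  unfold check_xss_attempt check_xss_attempt_alt
  by_cases h : content.toList = []
  · simp [PySem.Str.len_eq, h, PySem.Chars.lower]
  · have hne0 : content ≠ "" := fun e => h (e ▸ rfl)
    rw [if_neg (by simp [PySem.Str.len_eq, hne0])]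
    have hne : ∀ p ∈ xssPatterns, p.toList ≠ [] := by decide
    have step : ∀ p ∈ xssPatterns,
        PySem.Str.isIn p (PySem.Str.lower content)
          = (List.range (PySem.Chars.lower content.toList).length).any
              (fun i => PySem.Chars.startswith ((PySem.Chars.lower content.toList).drop i) p.toList) := by
      intro p hp
      rw [PySem.Str.isIn_eq, PySem.Str.toList_lower]
      exact isIn_eq_any_startswith _ _ (hne p hp)
    -- swap the order of the two `any`s
    apply Bool.eq_iff_iff.mpr
    simp only [List.any_eq_true, List.mem_range]
    constructor
    · rintro ⟨p, hp, hIn⟩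
      rw [step p hp] at hIn
      obtain ⟨i, hi, hsw⟩ := by simpa using hIn
      exact ⟨i, hi, p, hp, hsw⟩
    · rintro ⟨i, hi, p, hp, hsw⟩
      refine ⟨p, hp, ?_⟩
      rw [step p hp]
      simp only [List.any_eq_true, List.mem_range]
      exact ⟨i, hi, hsw⟩

-- ===== VERDICT (by name: the statement is the Claim_ definition above) =====
theorem check_xss_attempt_spec : Claim_equal_check_xss_attempt := by
  intro content _
  exact check_xss_eq content
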